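-- pv_equiv track=rewrite | github.com/Mhaavald/ChessFEN | src/inference/inference_service.py | validate_fen
-- ===== SOURCE A (Python) =====
-- def validate_fen(fen: str) -> bool:
--     """
--     Validate a FEN string (board position only, not full FEN).
--
--     Returns True if the FEN is valid (8 rows, 8 squares each, exactly 1 king per side).
--     """
--     try:
--         rows = fen.split('/')
--
--         if len(rows) != 8:
--             return False
--
--         white_kings = 0
--         black_kings = 0
--
--         for row in rows:
--             count = 0
--             for char in row:
--                 if char.isdigit():
--                     count += int(char)
--                 elif char in 'pnbrqkPNBRQK':
--                     count += 1
--                     if char == 'K':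
--                         white_kings += 1
--                     elif char == 'k':
--                         black_kings += 1
--                 else:
--                     return False
--
--             if count != 8:
--                 return False
--
--         # Must have exactly 1 king per side
--         return white_kings == 1 and black_kings == 1
--     except Exception:
--         return False
-- ===== SOURCE B (Python) =====
-- def validate_fen(fen: str) -> bool:
--     """
--     Validate a FEN string (board position only, not full FEN).
--
--     Single-pass state machine over the raw string: no split('/') and no row
--     list; '/' characters are counted and the running square sum of the current
--     rank is checked at each '/' and at the end (7 slashes <=> 8 ranks).
--     """
--     try:
--         cur = 0
--         slashes = 0
--         white_kings = 0
--         black_kings = 0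
--
--         for c in fen:
--             if c == '/':
--                 if cur != 8:
--                     return False
--                 cur = 0
--                 slashes += 1
--             elif c.isdigit():
--                 cur += int(c)
--             elif c in 'pnbrqkPNBRQK':
--                 cur += 1
--                 if c == 'K':
--                     white_kings += 1
--                 elif c == 'k':
--                     black_kings += 1
--             else:
--                 return False
--
--         return cur == 8 and slashes == 7 and white_kings == 1 and black_kings == 1
--     except Exception:
--         return False
-- ===== Notes on version B (the rewrite author's own statement) =====
-- stated objective: alternative
-- what changed: A splits the string on '/' into a row list and runs nested loops over rows and their characters; B never splits or builds a row list: it is a single linear state machine over the raw characters that counts '/' separators (7 slashes = 8 ranks) and checks the running square sum at each '/' and at the end.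
import Mathlib
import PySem

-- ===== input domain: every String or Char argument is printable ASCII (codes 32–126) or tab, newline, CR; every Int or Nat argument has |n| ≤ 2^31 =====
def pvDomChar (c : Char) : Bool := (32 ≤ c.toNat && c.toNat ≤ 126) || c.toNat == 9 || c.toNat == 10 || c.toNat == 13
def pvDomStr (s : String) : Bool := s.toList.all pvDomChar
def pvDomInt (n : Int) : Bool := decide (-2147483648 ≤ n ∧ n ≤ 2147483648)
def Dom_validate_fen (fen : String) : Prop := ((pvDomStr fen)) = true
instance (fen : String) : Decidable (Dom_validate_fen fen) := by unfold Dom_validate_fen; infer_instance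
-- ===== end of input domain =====

-- B replaces A's split-into-rows + nested loops by a single-pass state machine over the raw
-- characters (counting '/' separators, checking the running rank sum at each '/'); alternative
-- decomposition, same cost.


-- ===== PORT A =====
-- char in 'pnbrqkPNBRQK'
def pvPieceA (c : Char) : Bool := "pnbrqkPNBRQK".toList.contains c

-- inner 'for char in row' loop: carries (count, white_kings, black_kings); none = 'return False'.
-- int(char) for a char with isdigit = true is its digit value (exact: PySem.Chars.isdigit is '0'..'9').
def pvRowA : List Char → Int → Int → Int → Option (Int × Int × Int)
  | [], count, wk, bk => some (count, wk, bk)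
  | c :: rest, count, wk, bk =>
    if PySem.Chars.isdigit c then
      pvRowA rest (count + ((c.toNat : Int) - 48)) wk bk
    else if pvPieceA c then
      pvRowA rest (count + 1) (if c = 'K' then wk + 1 else wk)
        (if c = 'K' then bk else if c = 'k' then bk + 1 else bk)
    else none

-- outer 'for row in rows' loop; none = 'return False'
def pvRowsA : List (List Char) → Int → Int → Option (Int × Int)
  | [], wk, bk => some (wk, bk)
  | r :: rs, wk, bk =>
    match pvRowA r 0 wk bk with
    | none => none
    | some (count, wk', bk') => if count ≠ 8 then none else pvRowsA rs wk' bk'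

-- fen.split('/'): the separator is nonempty so Python's split never raises; Chars.splitOn is split?'s total form
def validate_fen (fen : String) : Bool :=
  let rows := PySem.Chars.splitOn fen.toList ['/']
  if rows.length ≠ 8 then false
  else
    match pvRowsA rows 0 0 with
    | none => false
    | some (wk, bk) => wk == 1 && bk == 1

-- ===== PORT B =====
-- c in 'pnbrqkPNBRQK'
def pvPieceB (c : Char) : Bool := "pnbrqkPNBRQK".toList.contains c

-- the single 'for c in fen' loop: state (cur, slashes, white_kings, black_kings); false = 'return False'
def pvScanB : List Char → Int → Int → Int → Int → Bool
  | [], cur, sl, wk, bk => cur == 8 && sl == 7 && wk == 1 && bk == 1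
  | c :: t, cur, sl, wk, bk =>
    if c = '/' then
      if cur ≠ 8 then false else pvScanB t 0 (sl + 1) wk bk
    else if PySem.Chars.isdigit c then
      pvScanB t (cur + ((c.toNat : Int) - 48)) sl wk bk
    else if pvPieceB c then
      pvScanB t (cur + 1) sl (if c = 'K' then wk + 1 else wk)
        (if c = 'K' then bk else if c = 'k' then bk + 1 else bk)
    else false

def validate_fen_alt (fen : String) : Bool := pvScanB fen.toList 0 0 0 0

-- ===== PRECONDITION & SPEC =====
def Spec_validate_fen (fen : String) (out : Bool) : Prop := out = validate_fen_alt fen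
instance (fen : String) (out : Bool) : Decidable (Spec_validate_fen fen out) := by unfold Spec_validate_fen; infer_instance

-- ===== CLAIM (what is proved, stated in full; the proofs are below) =====
def Claim_equal_validate_fen : Prop := ∀ (fen : String), Dom_validate_fen fen → Spec_validate_fen fen (validate_fen fen)

-- ===== LEMMAS AND PROOFS =====

-- proof-side vocabulary -------------------------------------------------------

def pvValid (c : Char) : Bool := PySem.Chars.isdigit c || pvPieceA c

def pvRowSum (r : List Char) : Int :=
  (r.map (fun c => if PySem.Chars.isdigit c then ((c.toNat : Int) - 48) else 1)).sum

-- 'every row consists of valid chars and sums to 8'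
def pvRowsOK : List (List Char) → Bool
  | [] => true
  | r :: rs => r.all pvValid && (pvRowSum r == 8) && pvRowsOK rs

-- total count of a character over a list of rows
def pvTot (rs : List (List Char)) (c : Char) : Int := ((rs.map (·.count c)).sum : Int)

-- a recursive model of fen.split('/')
def pvSplit : List Char → List Char → List (List Char)
  | [], cur => [cur.reverse]
  | c :: t, cur => if c = '/' then cur.reverse :: pvSplit t [] else pvSplit t (c :: cur)

-- splitOn agrees with the model ----------------------------------------------

theorem pvSplitGo_eq :
    ∀ (fuel : Nat) (l cur : List Char) (acc : List (List Char)), l.length ≤ fuel →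
    PySem.Chars.splitOn.go ['/'] fuel l cur acc
      = acc.reverse ++ pvSplit l cur := by
  intro fuel
  induction fuel with
  | zero => intro l cur acc h; cases l with
    | nil => simp [PySem.Chars.splitOn.go, pvSplit]
    | cons x t => simp at h
  | succ n ih =>
    intro l cur acc h
    cases l with
    | nil => simp [PySem.Chars.splitOn.go, pvSplit]
    | cons x t =>
      simp only [PySem.Chars.splitOn.go]
      have hpre : ['/'].isPrefixOf (x :: t) = ('/' == x) := by simp [List.isPrefixOf]
      have ht : t.length ≤ n := by simpa using Nat.lt_succ_iff.mp (by simpa using h)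
      by_cases hs : '/' = x
      · subst hs
        simp only [hpre, beq_self_eq_true, if_true, List.length_cons, List.length_nil,
          List.drop_succ_cons, List.drop_zero]
        rw [ih t [] (cur.reverse :: acc) ht]
        simp [pvSplit]
      · have hb : ('/' == x) = false := by simp [hs]
        simp only [hpre, hb, Bool.false_eq_true, if_false]
        rw [ih t (x :: cur) acc ht]
        simp [pvSplit, Ne.symm hs]

theorem pvSplitOn_eq (l : List Char) :
    PySem.Chars.splitOn l ['/'] = pvSplit l [] := by
  simp only [PySem.Chars.splitOn]
  rw [pvSplitGo_eq (l.length + 1) l [] [] (by omega)]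
  simp

-- pvSplit never returns the empty list, and the accumulator only prefixes the head row
theorem pvSplit_ne_nil (l cur : List Char) : pvSplit l cur ≠ [] := by
  induction l generalizing cur with
  | nil => simp [pvSplit]
  | cons c t ih => by_cases h : c = '/' <;> simp [pvSplit, h, ih]

theorem pvSplit_acc (l : List Char) : ∀ (cur : List Char),
    pvSplit l cur = (cur.reverse ++ (pvSplit l []).headI) :: (pvSplit l []).tail := by
  induction l with
  | nil => intro cur; simp [pvSplit]
  | cons c t ih =>
    intro cur
    by_cases h : c = '/'
    · simp [pvSplit, h]
    · simp only [pvSplit, h, if_false, Bool.false_eq_true]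
      rw [ih (c :: cur), ih [c]]
      simp

-- A's loops, characterised ----------------------------------------------------

theorem pvRowA_eq (r : List Char) : ∀ (count wk bk : Int),
    pvRowA r count wk bk =
      if r.all pvValid then
        some (count + pvRowSum r, wk + (r.count 'K' : Int), bk + (r.count 'k' : Int))
      else none := by
  induction r with
  | nil => intro count wk bk; simp [pvRowA, pvRowSum]
  | cons c rest ih =>
    intro count wk bk
    by_cases hd : PySem.Chars.isdigit c
    · have hK : c ≠ 'K' := by intro h; subst h; simp [PySem.Chars.isdigit] at hd
      have hk : c ≠ 'k' := by intro h; subst h; simp [PySem.Chars.isdigit] at hd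
      have hv : pvValid c = true := by simp [pvValid, hd]
      rw [pvRowA, if_pos hd, ih]
      simp only [List.all_cons, hv, Bool.true_and, pvRowSum, List.map_cons, List.sum_cons, hd,
        if_true, List.count_cons, hK, hk]
      split
      · simp only [Option.some.injEq, Prod.mk.injEq]
        refine ⟨by ring, by simp [hK, hk], by simp [hK, hk]⟩
      · rfl
    · by_cases hp : pvPieceA c
      · have hv : pvValid c = true := by simp [pvValid, hd]; simpa [pvPieceA] using hp
        rw [pvRowA, if_neg hd, if_pos hp, ih]
        simp only [List.all_cons, hv, Bool.true_and, pvRowSum, List.map_cons, List.sum_cons, hd,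
          if_false, List.count_cons]
        split
        · simp only [Option.some.injEq, Prod.mk.injEq]
          refine ⟨by simp [hd]; ring, ?_, ?_⟩
          · by_cases hK : c = 'K' <;> simp [hK] <;> omega
          · by_cases hK : c = 'K'
            · simp [hK] <;> omega
            · by_cases hk : c = 'k'
              · simp [hk] <;> omega
              · simp [hK, hk] <;> omega
        · rfl
      · have hv : ¬ pvValid c = true := by
          simp [pvValid, hd]; simpa [pvPieceA] using hp
        rw [pvRowA, if_neg hd, if_neg hp]
        simp [hv]

theorem pvRowsA_eq (rs : List (List Char)) : ∀ (wk bk : Int),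
    pvRowsA rs wk bk =
      if pvRowsOK rs then some (wk + pvTot rs 'K', bk + pvTot rs 'k') else none := by
  induction rs with
  | nil => intro wk bk; simp [pvRowsA, pvRowsOK, pvTot]
  | cons r rs ih =>
    intro wk bk
    by_cases hv : r.all pvValid
    · by_cases h8 : pvRowSum r = 8
      · simp only [pvRowsA, pvRowA_eq, hv, if_true, zero_add, h8, pvRowsOK, beq_self_eq_true,
          Bool.and_true, Bool.true_and, ne_eq, not_true_eq_false, if_false, ih, pvTot,
          List.map_cons, List.sum_cons]
        split
        · simp only [Option.some.injEq, Prod.mk.injEq]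
          push_cast
          constructor <;> ring
        · rfl
      · have h8' : (pvRowSum r == 8) = false := by simpa using h8
        simp [pvRowsA, pvRowA_eq, hv, pvRowsOK, h8, h8']
    · simp [pvRowsA, pvRowA_eq, hv, pvRowsOK]

-- B's scan, characterised ------------------------------------------------------

theorem pvScanB_eq (l : List Char) : ∀ (cur sl wk bk : Int),
    pvScanB l cur sl wk bk =
      ((pvSplit l []).headI.all pvValid
        && (cur + pvRowSum (pvSplit l []).headI == 8)
        && pvRowsOK (pvSplit l []).tail
        && (sl + ((pvSplit l []).tail.length : Int) == 7)
        && (wk + pvTot (pvSplit l []) 'K' == 1)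
        && (bk + pvTot (pvSplit l []) 'k' == 1)) := by
  induction l with
  | nil =>
    intro cur sl wk bk
    simp only [pvSplit, List.reverse_nil, List.headI, List.tail, pvScanB, pvRowsOK, pvRowSum,
      pvTot, List.all_nil, List.map_nil, List.sum_nil, List.map_cons, List.count_nil,
      List.sum_cons, List.length_nil, Bool.true_and, Bool.and_true, add_zero, Nat.cast_zero]
  | cons c t ih =>
    intro cur sl wk bk
    obtain ⟨r, rs, hrs⟩ : ∃ r rs, pvSplit t [] = r :: rs := by
      cases h : pvSplit t [] with
      | nil => exact absurd h (pvSplit_ne_nil t [])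
      | cons a b => exact ⟨a, b, rfl⟩
    by_cases hs : c = '/'
    · subst hs
      have hsplit : pvSplit ('/' :: t) [] = [] :: pvSplit t [] := by simp [pvSplit]
      simp only [pvScanB, if_pos rfl]
      rw [ih, hsplit, hrs]
      simp only [List.headI, List.tail, pvRowsOK, pvRowSum, List.all_nil, List.map_nil,
        List.sum_nil, add_zero, pvTot, List.map_cons, List.count_nil, List.sum_cons,
        List.length_cons, Bool.true_and]
      cases hA : r.all pvValid <;> cases hOK : pvRowsOK rs <;> split_ifs with h8 <;>
        (rw [Bool.eq_iff_iff];
         simp only [Bool.and_eq_true, beq_iff_eq, Bool.false_eq_true, Bool.false_and,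
           Bool.and_false, Bool.true_and, Bool.and_true];
         try push_cast;
         try ring_nf;
         try tauto)
    · have hsplit : pvSplit (c :: t) [] = (c :: r) :: rs := by
        simp only [pvSplit, hs, if_false, Bool.false_eq_true]
        rw [pvSplit_acc t [c], hrs]
        simp
      simp only [pvScanB, hs, if_false, Bool.false_eq_true]
      rw [hsplit]
      simp only [List.headI, List.tail]
      by_cases hd : PySem.Chars.isdigit c
      · have hK : c ≠ 'K' := by intro h; subst h; simp [PySem.Chars.isdigit] at hd
        have hk : c ≠ 'k' := by intro h; subst h; simp [PySem.Chars.isdigit] at hd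
        have hv : pvValid c = true := by simp [pvValid, hd]
        simp only [hd, if_true]
        rw [ih, hrs]
        simp only [List.headI, List.tail, List.all_cons, hv, Bool.true_and, pvRowSum,
          List.map_cons, List.sum_cons, hd, if_true, pvTot, List.count_cons, hK, hk,
          if_false, Bool.false_eq_true]
        cases hA : r.all pvValid <;> cases hOK : pvRowsOK rs <;>
          (rw [Bool.eq_iff_iff];
           simp only [Bool.and_eq_true, beq_iff_eq, Bool.false_eq_true, Bool.false_and,
             Bool.and_false, Bool.true_and, Bool.and_true, hK, hk, if_false];
           try push_cast;
           try ring_nf;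
           try tauto)
      · by_cases hp : pvPieceB c
        · have hv : pvValid c = true := by
            have : pvPieceA c = true := by simpa [pvPieceA] using (by simpa [pvPieceB] using hp)
            simp [pvValid, this]
          simp only [hd, if_false, hp, if_true, Bool.false_eq_true]
          rw [ih, hrs]
          simp only [List.headI, List.tail, List.all_cons, hv, Bool.true_and, pvRowSum,
            List.map_cons, List.sum_cons, hd, if_false, pvTot, List.count_cons,
            Bool.false_eq_true]
          by_cases hcK : c = 'K' <;> by_cases hck : c = 'k'
          · subst hcK; exact absurd hck (by decide)
          all_goals
            cases hA : r.all pvValid <;> cases hOK : pvRowsOK rs <;>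
              (rw [Bool.eq_iff_iff];
               simp only [Bool.and_eq_true, beq_iff_eq, Bool.false_eq_true, Bool.false_and,
                 Bool.and_false, Bool.true_and, Bool.and_true, hcK, hck, if_true, if_false];
               try push_cast;
               try ring_nf;
               try tauto)
        · have hv : pvValid c = false := by
            have hpa : pvPieceA c = false := by
              simpa [pvPieceA] using (by simpa [pvPieceB] using hp)
            simp [pvValid, hd, hpa]
          simp only [hd, if_false, hp, Bool.false_eq_true]
          simp [List.all_cons, hv]

-- ===== VERDICT (by name: the statement is the Claim_ definition above) =====
theorem validate_fen_spec : Claim_equal_validate_fen := by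
  intro fen _
  unfold Spec_validate_fen validate_fen validate_fen_alt
  rw [pvSplitOn_eq, pvScanB_eq]
  obtain ⟨r, rs, hrs⟩ : ∃ r rs, pvSplit fen.toList [] = r :: rs := by
    cases h : pvSplit fen.toList [] with
    | nil => exact absurd h (pvSplit_ne_nil fen.toList [])
    | cons a b => exact ⟨a, b, rfl⟩
  rw [hrs]
  simp only [pvRowsA_eq]
  simp only [List.headI, List.tail, List.length_cons, pvRowsOK, pvTot, List.map_cons,
    List.sum_cons, zero_add]
  by_cases hlen : rs.length = 7
  · simp only [hlen, if_neg (by omega : ¬ (7 + 1 ≠ 8))]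
    cases hA : r.all pvValid <;> cases hOK : pvRowsOK rs <;> split_ifs with hS <;>
      (try simp only [Bool.and_eq_true, Bool.true_and, Bool.and_true, Bool.false_and,
         Bool.and_false, beq_iff_eq, Bool.false_eq_true] at hS;
       try (show false = _);
       try rw [Bool.eq_iff_iff];
       try simp only [Bool.and_eq_true, beq_iff_eq, Bool.false_eq_true, Bool.false_and,
         Bool.and_false, Bool.true_and, Bool.and_true];
       try push_cast;
       try ring_nf;
       try tauto)
  · have h8 : rs.length + 1 ≠ 8 := by omega
    simp only [h8, ne_eq, not_false_eq_true, if_true]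
    cases hA : r.all pvValid <;> cases hOK : pvRowsOK rs <;>
      (rw [Bool.eq_iff_iff];
       simp only [Bool.and_eq_true, beq_iff_eq, Bool.false_eq_true, Bool.false_and,
         Bool.and_false, Bool.true_and, Bool.and_true];
       try push_cast;
       try ring_nf;
       try tauto;
       try (simp only [false_iff]; rintro ⟨⟨⟨h1, h2⟩, h3⟩, h4⟩;
            exact hlen (by exact_mod_cast h2)))
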